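-- pv_equiv track=rewrite | github.com/pkublas/AdventOfCode2024 | day2/2.py | is_report_valid
-- ===== SOURCE A (Python) =====
-- def get_diff(report):
--     indices = zip(range(0, len(report)), range(1, len(report)))
--     return [report[i] - report[j] for i, j in indices]
--
-- def get_diff_in_range(report_diff):
--     report_diff_in_range = [1 if 1 <= abs(e) <= 3 else 0 for e in report_diff]
--     return all(report_diff_in_range)
--
-- def get_direction(report_diff):
--     report_diff_above_zero = [1 if e > 0 else 0 for e in report_diff]
--     report_diff_below_zero = [1 if e < 0 else 0 for e in report_diff]
--     return all(report_diff_above_zero) or all(report_diff_below_zero)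
--
-- def is_report_valid(report, do_recursive=True):
--     report_diff = get_diff(report)
--     is_diff_in_range = get_diff_in_range(report_diff)
--     is_directional = get_direction(report_diff)
--     report_is_valid = is_diff_in_range and is_directional
--     if report_is_valid:
--         return True
--     elif do_recursive:
--         for layer in range(0, len(report)):
--             report_copy = report.copy()
--             report_copy.pop(layer)
--             if is_report_valid(report_copy, do_recursive=False):
--                 return True
--         else:
--             return False
--     else:
--         return False
-- ===== SOURCE B (Python) =====
-- def is_report_valid(report, do_recursive=True):
--     # One pass per direction: find the first bad adjacent pair; with the
--     # dampener only removing one of its two members can help.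
--     def first_bad(r, s):
--         i = 0
--         for a, b in zip(r, r[1:]):
--             if not (1 <= s * (b - a) <= 3):
--                 return i
--             i += 1
--         return None
--
--     for s in (1, -1):
--         i = first_bad(report, s)
--         if i is None:
--             return True
--         if do_recursive:
--             for j in (i, i + 1):
--                 if first_bad(report[:j] + report[j + 1:], s) is None:
--                     return True
--     return False
-- ===== Notes on version B (the rewrite author's own statement) =====
-- stated objective: faster
-- what changed: A retries the full diff-list validity test after removing every one of the n elements (O(n^2)); B makes one pass per direction to locate the first bad adjacent pair and only tests removing its two members, since any other removal leaves that bad pair adjacent.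
import Mathlib
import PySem

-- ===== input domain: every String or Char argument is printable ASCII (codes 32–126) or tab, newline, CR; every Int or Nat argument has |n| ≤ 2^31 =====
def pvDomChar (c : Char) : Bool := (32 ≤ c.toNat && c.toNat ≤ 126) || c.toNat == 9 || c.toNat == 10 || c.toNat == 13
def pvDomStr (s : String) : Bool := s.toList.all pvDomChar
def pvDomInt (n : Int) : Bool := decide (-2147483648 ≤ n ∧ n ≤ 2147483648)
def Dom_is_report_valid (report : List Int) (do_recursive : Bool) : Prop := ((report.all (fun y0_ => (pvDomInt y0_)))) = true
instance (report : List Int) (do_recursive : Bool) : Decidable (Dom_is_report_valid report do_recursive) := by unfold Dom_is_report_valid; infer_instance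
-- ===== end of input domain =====

-- B replaces A's try-every-removal O(n^2) dampener by one pass per direction: only
-- removing a member of the FIRST bad adjacent pair can help, so O(n) checks suffice.

-- ===== PORT A =====
def get_diff (report : List Int) : List Int :=
  let indices := (PySem.List.pyRange 0 (report.length : Int) 1).zip
                 (PySem.List.pyRange 1 (report.length : Int) 1)
  -- report[i] - report[j]: i,j coming from the zipped ranges are always in range,
  -- so the total pyGetD (default 0) is exact here
  indices.map (fun ij => PySem.List.pyGetD report ij.1 0 - PySem.List.pyGetD report ij.2 0)

def get_diff_in_range (report_diff : List Int) : Bool :=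
  let report_diff_in_range := report_diff.map (fun e => if 1 ≤ |e| ∧ |e| ≤ 3 then (1 : Int) else 0)
  report_diff_in_range.all (fun x => x != 0)   -- all(): every element truthy (nonzero)

def get_direction (report_diff : List Int) : Bool :=
  let report_diff_above_zero := report_diff.map (fun e => if 0 < e then (1 : Int) else 0)
  let report_diff_below_zero := report_diff.map (fun e => if e < 0 then (1 : Int) else 0)
  report_diff_above_zero.all (fun x => x != 0) || report_diff_below_zero.all (fun x => x != 0)

def is_report_valid (report : List Int) (do_recursive : Bool) : Bool :=
  let report_diff := get_diff report
  let is_diff_in_range := get_diff_in_range report_diff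
  let is_directional := get_direction report_diff
  let report_is_valid := is_diff_in_range && is_directional
  if report_is_valid then true
  else match do_recursive with
  | true =>
      (PySem.List.pyRange 0 (report.length : Int) 1).any (fun layer =>
        -- report_copy.pop(layer): layer is always in range, so pop? is never none
        match PySem.List.pop? report layer with
        | some p => is_report_valid p.2 false
        | none => false)
  | false => false
termination_by do_recursive.toNat
decreasing_by simp

-- ===== PORT B =====
-- B's `for a, b in zip(r, r[1:])` loop with counter i, as the obvious structural
-- recursion over adjacent pairs
def first_bad : List Int → Int → Nat → Option Nat
  | a :: b :: rest, s, i =>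
      if 1 ≤ s * (b - a) ∧ s * (b - a) ≤ 3 then first_bad (b :: rest) s (i + 1) else some i
  | _, _, _ => none

-- body of B's `for s in (1, -1)` loop (early `return True` = Bool or below);
-- report[:j] + report[j+1:] with 0 ≤ j is take/drop (PySem.List.slice_to_natCast/slice_from_natCast)
def try_direction (report : List Int) (do_recursive : Bool) (s : Int) : Bool :=
  match first_bad report s 0 with
  | none => true
  | some i =>
      do_recursive &&
        ((first_bad (report.take i ++ report.drop (i + 1)) s 0 == none) ||
         (first_bad (report.take (i + 1) ++ report.drop (i + 2)) s 0 == none))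

def is_report_valid_alt (report : List Int) (do_recursive : Bool) : Bool :=
  try_direction report do_recursive 1 || try_direction report do_recursive (-1)

-- ===== PRECONDITION & SPEC =====
def Spec_is_report_valid (report : List Int) (do_recursive : Bool) (out : Bool) : Prop := out = is_report_valid_alt report do_recursive
instance (report : List Int) (do_recursive : Bool) (out : Bool) : Decidable (Spec_is_report_valid report do_recursive out) := by unfold Spec_is_report_valid; infer_instance

-- ===== CLAIM (what is proved, stated in full; the proofs are below) =====
def Claim_equal_is_report_valid : Prop := ∀ (report : List Int) (do_recursive : Bool), Dom_is_report_valid report do_recursive → Spec_is_report_valid report do_recursive (is_report_valid report do_recursive)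

-- ===== LEMMAS AND PROOFS =====

-- the adjacent-pair condition B checks (s = 1: increasing step, s = -1: decreasing step)
def Ok (s a b : Int) : Prop := 1 ≤ s * (b - a) ∧ s * (b - a) ≤ 3

-- a report is valid for A iff it is an Ok-chain in one of the two directions
def BaseValid (l : List Int) : Prop := List.IsChain (Ok 1) l ∨ List.IsChain (Ok (-1)) l

theorem ite_one_zero (P : Prop) [Decidable P] :
    ((if P then (1 : Int) else 0) != 0) = true ↔ P := by
  by_cases h : P <;> simp [h]

theorem fb_none_iff (l : List Int) (s : Int) (c : Nat) :
    first_bad l s c = none ↔ List.IsChain (Ok s) l := by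
  induction l generalizing c with
  | nil => simp [first_bad]
  | cons a t ih =>
    cases t with
    | nil => simp [first_bad]
    | cons b rest =>
      rw [first_bad, List.isChain_cons_cons]
      split_ifs with h
      · rw [ih]
        exact ⟨fun hc => ⟨h, hc⟩, fun hc => hc.2⟩
      · simp [Ok, h]

theorem fb_some (l : List Int) (s : Int) :
    ∀ (c i : Nat), first_bad l s c = some i →
      c ≤ i ∧ (i - c) + 1 < l.length ∧ ¬ Ok s (l.getD (i - c) 0) (l.getD (i - c + 1) 0) := by
  induction l with
  | nil => intro c i h; simp [first_bad] at h
  | cons a t ih =>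
    cases t with
    | nil => intro c i h; simp [first_bad] at h
    | cons b rest =>
      intro c i h
      rw [first_bad] at h
      split_ifs at h with hok
      · obtain ⟨h1, h2, h3⟩ := ih (c + 1) i h
        refine ⟨by omega, ?_, ?_⟩
        · simp only [List.length_cons] at h2 ⊢; omega
        · have e1 : i - c = (i - (c + 1)) + 1 := by omega
          rw [e1]
          simpa using h3
      · obtain rfl : c = i := by simpa using h
        refine ⟨le_refl _, ?_, ?_⟩
        · simp only [Nat.sub_self, List.length_cons]; omega
        · simp only [Nat.sub_self, List.getD_cons_zero, List.getD_cons_succ]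
          exact hok

theorem get_diff_eq (l : List Int) :
    get_diff l = List.zipWith (fun a b => a - b) l l.tail := by
  apply List.ext_getElem
  · simp [get_diff, PySem.List.length_pyRange_one]
  · intro k h1 h2
    have hk : k < l.length - 1 := by
      simp [get_diff, PySem.List.length_pyRange_one] at h1
      omega
    simp only [get_diff, List.getElem_map, List.getElem_zip,
      PySem.List.getElem_pyRange_one, List.getElem_zipWith, List.getElem_tail]
    rw [show (0 : Int) + k = ((k : Nat) : Int) by omega,
        show (1 : Int) + k = (((k + 1 : Nat)) : Int) by omega]
    simp only [PySem.List.pyGetD_natCast]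
    rw [List.getD_eq_getElem l 0 (by omega), List.getD_eq_getElem l 0 (by omega)]

theorem all_zip_iff (p : Int → Bool) (l : List Int) :
    (List.zipWith (fun a b => a - b) l l.tail).all p = true ↔
      ∀ i (h : i + 1 < l.length), p (l[i] - l[i + 1]) := by
  simp only [List.all_eq_true]
  constructor
  · intro h i hi
    apply h
    refine List.mem_iff_getElem.mpr ⟨i, by simp [List.length_zipWith]; omega, ?_⟩
    simp [List.getElem_zipWith, List.getElem_tail]
  · intro h x hx
    obtain ⟨i, hi, rfl⟩ := List.mem_iff_getElem.mp hx
    have hi' : i + 1 < l.length := by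
      simp [List.length_zipWith] at hi; omega
    simpa [List.getElem_zipWith, List.getElem_tail] using h i hi'

theorem base_iff (l : List Int) :
    (get_diff_in_range (get_diff l) && get_direction (get_diff l)) = true ↔ BaseValid l := by
  rw [get_diff_eq]
  simp only [get_diff_in_range, get_direction, List.all_map, Bool.and_eq_true, Bool.or_eq_true,
    Function.comp_def, all_zip_iff, ite_one_zero, BaseValid, List.isChain_iff_getElem, Ok]
  constructor
  · rintro ⟨hr, hd | hd⟩
    · right
      intro i hi
      have h1 := hr i hi
      have h2 := hd i hi
      rcases abs_cases (l[i] - l[i + 1]) with ⟨he, h0⟩ | ⟨he, h0⟩ <;> omega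
    · left
      intro i hi
      have h1 := hr i hi
      have h2 := hd i hi
      rcases abs_cases (l[i] - l[i + 1]) with ⟨he, h0⟩ | ⟨he, h0⟩ <;> omega
  · rintro (hch | hch)
    · refine ⟨fun i hi => ?_, Or.inr fun i hi => ?_⟩ <;>
        · have h1 := hch i hi
          rcases abs_cases (l[i] - l[i + 1]) with ⟨he, h0⟩ | ⟨he, h0⟩ <;> omega
    · refine ⟨fun i hi => ?_, Or.inl fun i hi => ?_⟩ <;>
        · have h1 := hch i hi
          rcases abs_cases (l[i] - l[i + 1]) with ⟨he, h0⟩ | ⟨he, h0⟩ <;> omega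

-- characterization of A with the dampener off: just the base validity test
theorem A_false (l : List Int) : is_report_valid l false = true ↔ BaseValid l := by
  rw [show is_report_valid l false
      = (if get_diff_in_range (get_diff l) && get_direction (get_diff l) then true else false)
    from by rw [is_report_valid]]
  rw [← base_iff l]
  split_ifs with h <;> simp [h]

-- characterization of A with the dampener on: base validity, or some one-element removal valid
theorem A_true (l : List Int) :
    is_report_valid l true = true ↔
      BaseValid l ∨ ∃ k, k < l.length ∧ BaseValid (l.eraseIdx k) := by
  rw [show is_report_valid l true
      = (if get_diff_in_range (get_diff l) && get_direction (get_diff l) then true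
         else (PySem.List.pyRange 0 (l.length : Int) 1).any (fun layer =>
           match PySem.List.pop? l layer with
           | some p => is_report_valid p.2 false
           | none => false))
    from by rw [is_report_valid]]
  split_ifs with h
  · simp [(base_iff l).mp h]
  · rw [← base_iff l] at *
    simp only [List.any_eq_true]
    constructor
    · rintro ⟨layer, hmem, hg⟩
      rw [PySem.List.mem_pyRange_one] at hmem
      have hlt : layer.toNat < l.length := by omega
      rw [show layer = ((layer.toNat : Nat) : Int) by omega,
        PySem.List.pop?_natCast l layer.toNat hlt] at hg
      right
      exact ⟨layer.toNat, hlt, (A_false _).mp hg⟩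
    · rintro (hb | ⟨k, hk, hb⟩)
      · exact absurd hb h
      · refine ⟨(k : Int), ?_, ?_⟩
        · rw [PySem.List.mem_pyRange_one]; omega
        · rw [PySem.List.pop?_natCast l k hk]
          exact (A_false _).mpr hb

-- characterization of B's per-direction test
theorem tryd_iff (l : List Int) (dr : Bool) (s : Int) :
    try_direction l dr s = true ↔
      List.IsChain (Ok s) l ∨
        (dr = true ∧ ∃ i, first_bad l s 0 = some i ∧
          (List.IsChain (Ok s) (l.eraseIdx i) ∨ List.IsChain (Ok s) (l.eraseIdx (i + 1)))) := by
  cases hfb : first_bad l s 0 with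
  | none => simp [try_direction, hfb, (fb_none_iff l s 0).mp hfb]
  | some i =>
    rw [show try_direction l dr s
        = (dr && ((first_bad (l.take i ++ l.drop (i + 1)) s 0 == none) ||
                  (first_bad (l.take (i + 1) ++ l.drop (i + 2)) s 0 == none)))
      from by rw [try_direction, hfb]]
    have hnc : ¬ List.IsChain (Ok s) l := by
      rw [← fb_none_iff l s 0, hfb]; simp
    simp only [Bool.and_eq_true, Bool.or_eq_true, beq_iff_eq, fb_none_iff, hnc, false_or,
      Option.some.injEq]
    constructor
    · rintro ⟨hdr, hor⟩
      refine ⟨hdr, i, rfl, ?_⟩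
      simpa [List.eraseIdx_eq_take_drop_succ] using hor
    · rintro ⟨hdr, j, rfl, hor⟩
      refine ⟨hdr, ?_⟩
      simpa [List.eraseIdx_eq_take_drop_succ] using hor

-- only removing a member of the first bad pair can repair a direction
theorem persist (l : List Int) (s : Int) (i j : Nat)
    (hfb : first_bad l s 0 = some i) (hj : j < l.length)
    (hch : List.IsChain (Ok s) (l.eraseIdx j)) : j = i ∨ j = i + 1 := by
  obtain ⟨-, hlen, hbad⟩ := fb_some l s 0 i hfb
  simp only [Nat.sub_zero] at hlen hbad
  rw [List.getD_eq_getElem l 0 (by omega), List.getD_eq_getElem l 0 (by omega)] at hbad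
  by_contra hc
  obtain ⟨hc1, hc2⟩ := not_or.mp hc
  rw [List.isChain_iff_getElem] at hch
  have hlen' : (l.eraseIdx j).length = l.length - 1 := by
    rw [List.length_eraseIdx]; simp [hj]
  rcases Nat.lt_or_ge j i with hji | hji
  · -- j < i : the bad pair sits at positions i-1, i of the erased list
    have h1 : i - 1 + 1 < (l.eraseIdx j).length := by omega
    have := hch (i - 1) h1
    rw [List.getElem_eraseIdx_of_ge (by omega) (by omega),
        List.getElem_eraseIdx_of_ge (by omega) (by omega)] at this
    apply hbad
    have e1 : i - 1 + 1 = i := by omega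
    have e2 : i - 1 + 1 + 1 = i + 1 := by omega
    simp only [e1] at this
    exact this
  · -- j > i + 1 : the bad pair is untouched at positions i, i+1
    have hji' : i + 1 < j := by omega
    have h1 : i + 1 < (l.eraseIdx j).length := by omega
    have := hch i h1
    rw [List.getElem_eraseIdx_of_lt (by omega) (by omega),
        List.getElem_eraseIdx_of_lt (by omega) (by omega)] at this
    exact hbad this

theorem main_eq (l : List Int) (dr : Bool) :
    is_report_valid l dr = is_report_valid_alt l dr := by
  rw [Bool.eq_iff_iff]
  unfold is_report_valid_alt
  simp only [Bool.or_eq_true, tryd_iff]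
  cases dr with
  | false =>
    rw [A_false]
    simp only [Bool.false_eq_true, false_and, or_false, BaseValid]
  | true =>
    rw [A_true]
    constructor
    · rintro (hb | ⟨k, hk, hb⟩)
      · rcases hb with hb | hb
        · exact Or.inl (Or.inl hb)
        · exact Or.inr (Or.inl hb)
      · rcases hb with hb | hb
        · -- fixed in the increasing direction
          by_cases hcl : List.IsChain (Ok 1) l
          · exact Or.inl (Or.inl hcl)
          · obtain ⟨i, hfb⟩ : ∃ i, first_bad l 1 0 = some i := by
              cases hfb : first_bad l 1 0 with
              | none => exact absurd ((fb_none_iff l 1 0).mp hfb) hcl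
              | some i => exact ⟨i, rfl⟩
            rcases persist l 1 i k hfb hk hb with rfl | rfl
            · exact Or.inl (Or.inr ⟨rfl, k, hfb, Or.inl hb⟩)
            · exact Or.inl (Or.inr ⟨rfl, i, hfb, Or.inr hb⟩)
        · by_cases hcl : List.IsChain (Ok (-1)) l
          · exact Or.inr (Or.inl hcl)
          · obtain ⟨i, hfb⟩ : ∃ i, first_bad l (-1) 0 = some i := by
              cases hfb : first_bad l (-1) 0 with
              | none => exact absurd ((fb_none_iff l (-1) 0).mp hfb) hcl
              | some i => exact ⟨i, rfl⟩
            rcases persist l (-1) i k hfb hk hb with rfl | rfl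
            · exact Or.inr (Or.inr ⟨rfl, k, hfb, Or.inl hb⟩)
            · exact Or.inr (Or.inr ⟨rfl, i, hfb, Or.inr hb⟩)
    · have hwit : ∀ s : Int, s = 1 ∨ s = -1 → (∃ i, first_bad l s 0 = some i ∧
          (List.IsChain (Ok s) (l.eraseIdx i) ∨ List.IsChain (Ok s) (l.eraseIdx (i + 1)))) →
          ∃ k, k < l.length ∧ BaseValid (l.eraseIdx k) := by
        intro s hs
        rintro ⟨i, hfb, hor⟩
        obtain ⟨-, hlen, -⟩ := fb_some l s 0 i hfb
        simp only [Nat.sub_zero] at hlen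
        have hbv : ∀ m : List Int, List.IsChain (Ok s) m → BaseValid m := by
          intro m hm
          rcases hs with rfl | rfl
          · exact Or.inl hm
          · exact Or.inr hm
        rcases hor with hc | hc
        · exact ⟨i, by omega, hbv _ hc⟩
        · exact ⟨i + 1, by omega, hbv _ hc⟩
      rintro ((hb | ⟨-, hex⟩) | (hb | ⟨-, hex⟩))
      · exact Or.inl (Or.inl hb)
      · exact Or.inr (hwit 1 (Or.inl rfl) hex)
      · exact Or.inl (Or.inr hb)
      · exact Or.inr (hwit (-1) (Or.inr rfl) hex)

-- ===== VERDICT (by name: the statement is the Claim_ definition above) =====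
theorem is_report_valid_spec : Claim_equal_is_report_valid := by
  intro report dr _
  unfold Spec_is_report_valid
  exact main_eq report dr
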